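-- pv_equiv track=rewrite | github.com/anupyadav27/threat-engine | shared/common/arn.py | _infer_arn_resource_type
-- ===== SOURCE A (Python) =====
-- from typing import Optional
--
-- _EC2_PREFIX_MAP = {
--     "sg-":      "security-group",
--     "subnet-":  "subnet",
--     "igw-":     "internet-gateway",
--     "vpc-":     "vpc",
--     "vol-":     "volume",
--     "snap-":    "snapshot",
--     "lt-":      "launch-template",
--     "eni-":     "network-interface",
--     "acl-":     "network-acl",
--     "rtb-":     "route-table",
--     "nat-":     "natgateway",
--     "eipalloc-":"elastic-ip",
--     "pcx-":     "vpc-peering-connection",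
--     "vpce-":    "vpc-endpoint",
--     "i-":       "instance",
--     "ami-":     "image",
--     "tgw-rtb-": "transit-gateway-route-table",
--     "tgw-attach-": "transit-gateway-attachment",
--     "tgw-":     "transit-gateway",
--     "r-":       "vpc-block-public-access-exclusion",
--     "cgw-":     "customer-gateway",
--     "vgw-":     "vpn-gateway",
--     "dopt-":    "dhcp-options",
--     "fl-":      "flow-log",
--     "eigw-":    "egress-only-internet-gateway",
--     "pl-":      "prefix-list",
--     "asg-":     "auto-scaling-group",
-- }
--
-- _IAM_RESOURCE_TYPES = {
--     "user", "role", "policy", "group", "instance-profile",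
--     "saml-provider", "oidc-provider", "server-certificate",
-- }
--
-- def _detect_ec2_resource_type(resource_id: str) -> Optional[str]:
--     """Detect EC2 resource type from the resource-id prefix."""
--     # Check longer prefixes first (tgw-rtb- before tgw-)
--     for prefix in sorted(_EC2_PREFIX_MAP, key=len, reverse=True):
--         if resource_id.startswith(prefix):
--             return _EC2_PREFIX_MAP[prefix]
--     return None
--
-- def _infer_arn_resource_type(
--     service: str,
--     resource_id: str,
--     resource_type_hint: str = "",
-- ) -> Optional[str]:
--     """
--     Infer the ARN resource-type segment from available information.
--
--     Uses: prefix-based detection (sg- → security-group),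
--           resource_type hint (ec2.security-group → security-group),
--           and known IAM resource types.
--     """
--     # 1. EC2 prefix-based detection (most reliable)
--     if service == "ec2":
--         detected = _detect_ec2_resource_type(resource_id)
--         if detected:
--             return detected
--
--     # 2. resource_type hint: "ec2.security-group" → "security-group"
--     if resource_type_hint and "." in resource_type_hint:
--         suffix = resource_type_hint.split(".", 1)[1]
--         # Normalize underscores to hyphens
--         normalized = suffix.replace("_", "-")
--         if normalized:
--             return normalized
--
--     # 3. IAM resources
--     if service == "iam":
--         # resource_id for IAM is usually the name (no prefix)
--         # Use the resource_type_hint to determine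
--         if resource_type_hint:
--             for iam_type in _IAM_RESOURCE_TYPES:
--                 if iam_type in resource_type_hint.lower():
--                     return iam_type
--         # Default IAM resource type based on common patterns
--         return "resource"
--
--     return None
-- ===== SOURCE B (Python) =====
-- from typing import Optional
--
-- _EC2_PREFIX_MAP = {
--     "sg-":      "security-group",
--     "subnet-":  "subnet",
--     "igw-":     "internet-gateway",
--     "vpc-":     "vpc",
--     "vol-":     "volume",
--     "snap-":    "snapshot",
--     "lt-":      "launch-template",
--     "eni-":     "network-interface",
--     "acl-":     "network-acl",
--     "rtb-":     "route-table",
--     "nat-":     "natgateway",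
--     "eipalloc-":"elastic-ip",
--     "pcx-":     "vpc-peering-connection",
--     "vpce-":    "vpc-endpoint",
--     "i-":       "instance",
--     "ami-":     "image",
--     "tgw-rtb-": "transit-gateway-route-table",
--     "tgw-attach-": "transit-gateway-attachment",
--     "tgw-":     "transit-gateway",
--     "r-":       "vpc-block-public-access-exclusion",
--     "cgw-":     "customer-gateway",
--     "vgw-":     "vpn-gateway",
--     "dopt-":    "dhcp-options",
--     "fl-":      "flow-log",
--     "eigw-":    "egress-only-internet-gateway",
--     "pl-":      "prefix-list",
--     "asg-":     "auto-scaling-group",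
-- }
--
-- _IAM_RESOURCE_TYPES = {
--     "user", "role", "policy", "group", "instance-profile",
--     "saml-provider", "oidc-provider", "server-certificate",
-- }
--
-- def _infer_arn_resource_type(
--     service: str,
--     resource_id: str,
--     resource_type_hint: str = "",
-- ) -> Optional[str]:
--     # 1. EC2 prefix detection: one unsorted pass keeping the longest matching
--     #    prefix (two prefixes of the same id of equal length are identical, so
--     #    the longest match is unique and no sort is needed).
--     if service == "ec2":
--         best = None
--         best_len = -1
--         for prefix, value in _EC2_PREFIX_MAP.items():
--             if len(prefix) > best_len and resource_id.startswith(prefix):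
--                 best, best_len = value, len(prefix)
--         if best is not None:
--             return best
--
--     # 2. resource_type hint: "ec2.security-group" -> "security-group"
--     #    ("." in hint already implies the hint is nonempty)
--     if "." in resource_type_hint:
--         normalized = resource_type_hint.split(".", 1)[1].replace("_", "-")
--         if normalized:
--             return normalized
--
--     # 3. IAM resources (hint lowercased once, outside the loop)
--     if service == "iam":
--         if resource_type_hint:
--             low = resource_type_hint.lower()
--             for iam_type in _IAM_RESOURCE_TYPES:
--                 if iam_type in low:
--                     return iam_type
--         return "resource"
--
--     return None
-- ===== Notes on version B (the rewrite author's own statement) =====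
-- stated objective: alternative
-- what changed: EC2 prefix detection no longer sorts the prefixes by length and returns the first startswith hit; B makes one unsorted pass over the prefix map keeping the longest matching prefix (unique because equal-length prefixes of the same id coincide); the dot-hint guard drops the redundant empty-string test and the lowercased hint is hoisted out of the IAM loop.
import Mathlib
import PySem

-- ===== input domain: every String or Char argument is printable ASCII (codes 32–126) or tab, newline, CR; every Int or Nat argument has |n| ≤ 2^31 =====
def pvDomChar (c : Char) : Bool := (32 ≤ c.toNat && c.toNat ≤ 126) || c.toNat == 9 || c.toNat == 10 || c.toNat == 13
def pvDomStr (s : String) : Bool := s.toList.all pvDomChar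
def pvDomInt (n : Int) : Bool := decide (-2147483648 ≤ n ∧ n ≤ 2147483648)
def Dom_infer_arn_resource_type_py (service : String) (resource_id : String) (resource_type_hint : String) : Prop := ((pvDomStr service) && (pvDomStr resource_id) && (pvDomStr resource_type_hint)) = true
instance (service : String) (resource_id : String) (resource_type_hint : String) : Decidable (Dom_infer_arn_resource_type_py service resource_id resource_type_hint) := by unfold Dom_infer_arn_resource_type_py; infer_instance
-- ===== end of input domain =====

-- B replaces A's sort-prefixes-then-first-match EC2 detection by a single unsorted
-- pass that keeps the longest matching prefix (objective: alternative, same cost class).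
-- Python's iteration order over the set _IAM_RESOURCE_TYPES is hash-dependent and not
-- modelled; both Pythons iterate equal sets (identical order within one run), and both
-- ports fix the source-literal order.

-- shared module-level constants (both Python files carry the same literals)
def pvEc2PrefixMap : PySem.Dict String String := PySem.Dict.ofList [
  ("sg-", "security-group"), ("subnet-", "subnet"), ("igw-", "internet-gateway"),
  ("vpc-", "vpc"), ("vol-", "volume"), ("snap-", "snapshot"), ("lt-", "launch-template"),
  ("eni-", "network-interface"), ("acl-", "network-acl"), ("rtb-", "route-table"),
  ("nat-", "natgateway"), ("eipalloc-", "elastic-ip"), ("pcx-", "vpc-peering-connection"),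
  ("vpce-", "vpc-endpoint"), ("i-", "instance"), ("ami-", "image"),
  ("tgw-rtb-", "transit-gateway-route-table"), ("tgw-attach-", "transit-gateway-attachment"),
  ("tgw-", "transit-gateway"), ("r-", "vpc-block-public-access-exclusion"),
  ("cgw-", "customer-gateway"), ("vgw-", "vpn-gateway"), ("dopt-", "dhcp-options"),
  ("fl-", "flow-log"), ("eigw-", "egress-only-internet-gateway"), ("pl-", "prefix-list"),
  ("asg-", "auto-scaling-group")]

-- _IAM_RESOURCE_TYPES in source-literal order (set iteration order fixed, see header)
def pvIamResourceTypes : List String :=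
  ["user", "role", "policy", "group", "instance-profile",
   "saml-provider", "oidc-provider", "server-certificate"]

-- ===== PORT A =====
-- for prefix in sorted(...): if resource_id.startswith(prefix): return _EC2_PREFIX_MAP[prefix]
def pvDetectLoopA : String → List String → Option String
  | _, [] => none
  | rid, p :: rest =>
    if PySem.Str.startswith rid p then pvEc2PrefixMap.get? p   -- key comes from the dict, lookup always succeeds
    else pvDetectLoopA rid rest

def pvDetectEc2A (rid : String) : Option String :=
  pvDetectLoopA rid (PySem.List.sorted pvEc2PrefixMap.keys (fun p => PySem.Str.len p) true)

-- for iam_type in _IAM_RESOURCE_TYPES: if iam_type in resource_type_hint.lower(): return iam_type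
def pvIamLoopA : String → List String → Option String
  | _, [] => none
  | hint, t :: rest =>
    if PySem.Str.isIn t (PySem.Str.lower hint) then some t else pvIamLoopA hint rest

def pvIamStepA (service : String) (resource_type_hint : String) : Option String :=
  if service == "iam" then
    if resource_type_hint != "" then
      match pvIamLoopA resource_type_hint pvIamResourceTypes with
      | some t => some t
      | none => some "resource"
    else some "resource"
  else none

def infer_arn_resource_type_py (service : String) (resource_id : String) (resource_type_hint : String) : Option String :=
  -- 1. EC2 prefix-based detection
  match (if service == "ec2" then pvDetectEc2A resource_id else none) with
  | some d => some d     -- 'if detected:' — every map value is a nonempty literal, so truthy = present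
  | none =>
    -- 2. resource_type hint
    if (resource_type_hint != "") && PySem.Str.isIn "." resource_type_hint then
      let suffix := (PySem.List.pyGet? ((PySem.Str.splitMax? resource_type_hint "." 1).getD []) 1).getD ""  -- [1] in range: "." occurs
      let normalized := PySem.Str.replace suffix "_" "-"
      if normalized != "" then some normalized
      else pvIamStepA service resource_type_hint
    else pvIamStepA service resource_type_hint

-- ===== PORT B =====
-- best = None; best_len = -1; one pass over _EC2_PREFIX_MAP.items() keeping the longest match
def pvDetectEc2B (rid : String) : Option String :=
  (pvEc2PrefixMap.items.foldl
    (fun (st : Option String × Int) pv =>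
      if decide (((PySem.Str.len pv.1 : Int)) > st.2) && PySem.Str.startswith rid pv.1
      then (some pv.2, (PySem.Str.len pv.1 : Int))
      else st)
    (none, -1)).1

-- for iam_type in _IAM_RESOURCE_TYPES: if iam_type in low: return iam_type
def pvIamLoopB : String → List String → Option String
  | _, [] => none
  | low, t :: rest =>
    if PySem.Str.isIn t low then some t else pvIamLoopB low rest

def pvIamStepB (service : String) (resource_type_hint : String) : Option String :=
  if service == "iam" then
    if resource_type_hint != "" then
      match pvIamLoopB (PySem.Str.lower resource_type_hint) pvIamResourceTypes with
      | some t => some t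
      | none => some "resource"
    else some "resource"
  else none

def infer_arn_resource_type_py_alt (service : String) (resource_id : String) (resource_type_hint : String) : Option String :=
  match (if service == "ec2" then pvDetectEc2B resource_id else none) with
  | some d => some d     -- 'if best is not None: return best'
  | none =>
    if PySem.Str.isIn "." resource_type_hint then
      let normalized := PySem.Str.replace ((PySem.List.pyGet? ((PySem.Str.splitMax? resource_type_hint "." 1).getD []) 1).getD "") "_" "-"
      if normalized != "" then some normalized
      else pvIamStepB service resource_type_hint
    else pvIamStepB service resource_type_hint

-- ===== PRECONDITION & SPEC =====
def Spec_infer_arn_resource_type_py (service : String) (resource_id : String) (resource_type_hint : String) (out : Option String) : Prop := out = infer_arn_resource_type_py_alt service resource_id resource_type_hint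
instance (service : String) (resource_id : String) (resource_type_hint : String) (out : Option String) : Decidable (Spec_infer_arn_resource_type_py service resource_id resource_type_hint out) := by unfold Spec_infer_arn_resource_type_py; infer_instance

-- ===== CLAIM (what is proved, stated in full; the proofs are below) =====
def Claim_equal_infer_arn_resource_type_py : Prop := ∀ (service : String) (resource_id : String) (resource_type_hint : String), Dom_infer_arn_resource_type_py service resource_id resource_type_hint → Spec_infer_arn_resource_type_py service resource_id resource_type_hint (infer_arn_resource_type_py service resource_id resource_type_hint)

-- ===== LEMMAS AND PROOFS =====

-- two prefixes of the same string with equal length are equal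
theorem pvPrefix_eq_of_len_eq {rid p q : String}
    (hp : PySem.Str.startswith rid p = true) (hq : PySem.Str.startswith rid q = true)
    (hl : p.toList.length = q.toList.length) : p = q := by
  simp only [PySem.Str.startswith_eq, PySem.Chars.startswith_iff] at hp hq
  have h1 : p.toList <+: q.toList := List.prefix_of_prefix_length_le hp hq (le_of_eq hl)
  exact String.toList_inj.mp (h1.eq_of_length hl)

theorem pvDetectLoopA_eq_find? (rid : String) (l : List String) :
    pvDetectLoopA rid l
      = (l.find? (fun p => PySem.Str.startswith rid p)).bind (fun p => pvEc2PrefixMap.get? p) := by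
  induction l with
  | nil => rfl
  | cons p rest ih =>
    rw [pvDetectLoopA, List.find?_cons]
    cases h : PySem.Str.startswith rid p with
    | true => simp only [if_true, Option.bind_some]
    | false => simp only [Bool.false_eq_true, if_false, ih]

theorem pvFind?_sorted_max (q : String → Bool) (l : List String) (p : String)
    (hs : l.Pairwise (fun a b => PySem.Str.len b ≤ PySem.Str.len a))
    (hf : l.find? q = some p) :
    ∀ r ∈ l, q r = true → PySem.Str.len r ≤ PySem.Str.len p := by
  induction l with
  | nil => simp at hf
  | cons a rest ih =>
    rw [List.pairwise_cons] at hs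
    rw [List.find?_cons] at hf
    cases ha : q a with
    | true =>
      rw [ha] at hf; simp only [Option.some.injEq] at hf
      subst hf
      intro r hr _
      rcases hr with _ | hr
      · exact le_refl _
      · exact hs.1 r (by assumption)
    | false =>
      rw [ha] at hf; simp only at hf
      intro r hr hqr
      rcases hr with _ | hr
      · rw [hqr] at ha; cases ha
      · exact ih hs.2 hf r (by assumption) hqr

theorem pvFoldB_noop (q : String → Bool) (l : List (String × String)) (o : Option String) (n : Int)
    (h0 : ∀ pv ∈ l, q pv.1 = true → ¬ ((PySem.Str.len pv.1 : Int) > n)) :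
    l.foldl
      (fun (st : Option String × Int) pv =>
        if decide (((PySem.Str.len pv.1 : Int)) > st.2) && q pv.1
        then (some pv.2, (PySem.Str.len pv.1 : Int))
        else st) (o, n) = (o, n) := by
  induction l with
  | nil => rfl
  | cons a rest ih =>
    simp only [List.foldl_cons]
    have hcond : (decide ((PySem.Str.len a.1 : Int) > n) && q a.1) = false := by
      cases hs : q a.1 with
      | true =>
        rw [decide_eq_false (h0 a (by simp) hs), Bool.false_and]
      | false => rw [Bool.and_false]
    rw [hcond]
    simp only [Bool.false_eq_true, if_false]
    exact ih (fun pv hm => h0 pv (by simp [hm]))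

theorem pvFoldB_max (q : String → Bool) (l : List (String × String)) (o : Option String) (n : Int)
    (hPW : l.Pairwise (fun a b => q a.1 = true → q b.1 = true → PySem.Str.len a.1 ≠ PySem.Str.len b.1))
    (pv : String × String) (hmem : pv ∈ l) (hq : q pv.1 = true)
    (hn : (PySem.Str.len pv.1 : Int) > n)
    (hmax : ∀ qw ∈ l, q qw.1 = true → PySem.Str.len qw.1 ≤ PySem.Str.len pv.1) :
    l.foldl
      (fun (st : Option String × Int) pw =>
        if decide (((PySem.Str.len pw.1 : Int)) > st.2) && q pw.1
        then (some pw.2, (PySem.Str.len pw.1 : Int))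
        else st) (o, n) = (some pv.2, (PySem.Str.len pv.1 : Int)) := by
  induction l generalizing o n with
  | nil => cases hmem
  | cons a rest ih =>
    rw [List.pairwise_cons] at hPW
    simp only [List.foldl_cons]
    cases hqa : q a.1 with
    | false =>
      rw [Bool.and_false]
      simp only [Bool.false_eq_true, if_false]
      rcases List.mem_cons.mp hmem with rfl | hmem'
      · rw [hq] at hqa; cases hqa
      · exact ih o n hPW.2 hmem' hn (fun qw hw => hmax qw (List.mem_cons_of_mem _ hw))
    | true =>
      rw [Bool.and_true]
      by_cases hlen : (PySem.Str.len a.1 : Int) > n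
      · rw [decide_eq_true hlen]
        simp only [if_true]
        rcases List.mem_cons.mp hmem with rfl | hmem'
        · rw [pvFoldB_noop q rest (some pv.2) (PySem.Str.len pv.1 : Int)]
          intro qw hw hqw
          have h1 := hmax qw (List.mem_cons_of_mem _ hw) hqw
          have h2 := hPW.1 qw hw hq hqw
          omega
        · have h1 := hmax a (by simp) hqa
          have h2 := hPW.1 pv hmem' hqa hq
          have h3 : PySem.Str.len a.1 < PySem.Str.len pv.1 := lt_of_le_of_ne h1 h2
          exact ih (some a.2) (PySem.Str.len a.1 : Int) hPW.2 hmem' (by exact_mod_cast h3)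
            (fun qw hw => hmax qw (List.mem_cons_of_mem _ hw))
      · rw [decide_eq_false hlen]
        simp only [Bool.false_eq_true, if_false]
        rcases List.mem_cons.mp hmem with rfl | hmem'
        · exact absurd hn hlen
        · exact ih o n hPW.2 hmem' hn (fun qw hw => hmax qw (List.mem_cons_of_mem _ hw))

-- the EC2 prefix keys are pairwise distinct
theorem pvItems_fst_ne : pvEc2PrefixMap.items.Pairwise (fun a b => a.1 ≠ b.1) := by decide

theorem pvLen_toList (s : String) : PySem.Str.len s = (s.toList.length : Int) := by
  simp [PySem.Str.len]

theorem pvDetect_eq (rid : String) : pvDetectEc2A rid = pvDetectEc2B rid := by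
  classical
  set q : String → Bool := fun p => PySem.Str.startswith rid p with hqdef
  have hPW : pvEc2PrefixMap.items.Pairwise
      (fun a b => q a.1 = true → q b.1 = true → PySem.Str.len a.1 ≠ PySem.Str.len b.1) := by
    refine pvItems_fst_ne.imp ?_
    intro a b hne ha hb hlen
    rw [pvLen_toList, pvLen_toList] at hlen
    exact hne (pvPrefix_eq_of_len_eq ha hb (by exact_mod_cast hlen))
  have hkeys : pvEc2PrefixMap.keys = pvEc2PrefixMap.items.map (fun p => p.1) := rfl
  unfold pvDetectEc2A pvDetectEc2B
  rw [pvDetectLoopA_eq_find?]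
  set S := PySem.List.sorted pvEc2PrefixMap.keys (fun p => PySem.Str.len p) true with hSdef
  have hperm : S.Perm pvEc2PrefixMap.keys := PySem.List.sorted_perm _ _ _
  have hpw : S.Pairwise (fun a b => PySem.Str.len b ≤ PySem.Str.len a) :=
    PySem.List.sorted_pairwise_rev _ _
  cases hfind : S.find? q with
  | none =>
    rw [List.find?_eq_none] at hfind
    have h0 : ∀ pv ∈ pvEc2PrefixMap.items, q pv.1 = true → ¬ ((PySem.Str.len pv.1 : Int) > (-1 : Int)) := by
      intro pv hm hq
      have : pv.1 ∈ pvEc2PrefixMap.keys := by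
        rw [hkeys]; exact List.mem_map_of_mem hm
      exact absurd hq (hfind pv.1 (hperm.mem_iff.mpr this))
    exact (congrArg Prod.fst (pvFoldB_noop q pvEc2PrefixMap.items none (-1) h0)).symm
  | some p =>
    have hq : q p = true := List.find?_some hfind
    have hmemS : p ∈ S := List.mem_of_find?_eq_some hfind
    have hmemK : p ∈ pvEc2PrefixMap.keys := hperm.mem_iff.mp hmemS
    have hmax := pvFind?_sorted_max q S p hpw hfind
    have hcont : pvEc2PrefixMap.contains p = true := by
      rw [PySem.Dict.contains_eq_decide_mem_keys]; exact decide_eq_true hmemK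
    have hsome : (pvEc2PrefixMap.get? p).isSome := by
      rw [← PySem.Dict.contains_eq_isSome_get?]; exact hcont
    obtain ⟨v, hv⟩ := Option.isSome_iff_exists.mp hsome
    have hitem : (p, v) ∈ pvEc2PrefixMap.items := PySem.Dict.mem_items_of_get?_eq_some _ hv
    have hB := pvFoldB_max q pvEc2PrefixMap.items none (-1) hPW (p, v) hitem hq
      (by rw [pvLen_toList]; omega)
      (fun qw hw hqw => hmax qw.1
        (hperm.mem_iff.mpr (by rw [hkeys]; exact List.mem_map_of_mem hw)) hqw)
    exact hv.trans (congrArg Prod.fst hB).symm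

theorem pvGuard_eq (h : String) :
    ((h != "") && PySem.Str.isIn "." h) = PySem.Str.isIn "." h := by
  by_cases hh : h = ""
  · subst hh; decide
  · simp [hh]

theorem pvIamLoop_eq (hint : String) (l : List String) :
    pvIamLoopA hint l = pvIamLoopB (PySem.Str.lower hint) l := by
  induction l with
  | nil => rfl
  | cons t rest ih => simp [pvIamLoopA, pvIamLoopB, ih]

theorem pvIamStep_eq (s h : String) : pvIamStepA s h = pvIamStepB s h := by
  simp [pvIamStepA, pvIamStepB, pvIamLoop_eq]

-- ===== VERDICT (by name: the statement is the Claim_ definition above) =====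
theorem infer_arn_resource_type_py_spec : Claim_equal_infer_arn_resource_type_py := by
  intro service resource_id resource_type_hint _
  unfold Spec_infer_arn_resource_type_py
  unfold infer_arn_resource_type_py infer_arn_resource_type_py_alt
  rw [pvDetect_eq, pvGuard_eq, pvIamStep_eq]
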